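-- pv_equiv track=rewrite | github.com/LuigiVan01/Exploration_TargetLocalisation | autopilot.py | count_uncertain_cells_around
-- ===== SOURCE A (Python) =====
-- def count_uncertain_cells_around(index, occupancy_data_np, width, height):
--     """Counts the number of uncertain cells (-1) around a given cell within a defined box size."""
--     uncertain_count = 0
--     box_size = 5  # Define the size of the box around each cell
--
--     # Convert index to row and column
--     row = index // width
--     col = index % width
--
--     # Loop over the box around the cell
--     for dr in range(-box_size, box_size + 1):
--         for dc in range(-box_size, box_size + 1):
--             r = row + dr
--             c = col + dc
--             # Check if r and c are within bounds
--             if 0 <= r < height and 0 <= c < width: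
--                 neighbor_index = r * width + c
--                 if occupancy_data_np[neighbor_index] == -1:
--                     uncertain_count += 1
--     return uncertain_count
-- ===== SOURCE B (Python) =====
-- def count_uncertain_cells_around(index, occupancy_data_np, width, height):
--     """Counts the number of uncertain cells (-1) around a given cell within a defined box size."""
--     row, col = divmod(index, width)
--     r0, r1 = max(0, row - 5), min(height, row + 6)
--     c0, c1 = max(0, col - 5), min(width, col + 6)
--     if r0 >= r1 or c0 >= c1:
--         return 0
--     return sum(occupancy_data_np[r * width + c0 : r * width + c1].count(-1)
--                for r in range(r0, r1))
-- ===== Notes on version B (the rewrite author's own statement) =====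
-- stated objective: idiomatic
-- what changed: Instead of scanning all 121 (dr,dc) offsets with a per-cell bounds test, B clamps the box to the grid once and sums count(-1) over one contiguous row slice per clamped row.
import Mathlib
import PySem

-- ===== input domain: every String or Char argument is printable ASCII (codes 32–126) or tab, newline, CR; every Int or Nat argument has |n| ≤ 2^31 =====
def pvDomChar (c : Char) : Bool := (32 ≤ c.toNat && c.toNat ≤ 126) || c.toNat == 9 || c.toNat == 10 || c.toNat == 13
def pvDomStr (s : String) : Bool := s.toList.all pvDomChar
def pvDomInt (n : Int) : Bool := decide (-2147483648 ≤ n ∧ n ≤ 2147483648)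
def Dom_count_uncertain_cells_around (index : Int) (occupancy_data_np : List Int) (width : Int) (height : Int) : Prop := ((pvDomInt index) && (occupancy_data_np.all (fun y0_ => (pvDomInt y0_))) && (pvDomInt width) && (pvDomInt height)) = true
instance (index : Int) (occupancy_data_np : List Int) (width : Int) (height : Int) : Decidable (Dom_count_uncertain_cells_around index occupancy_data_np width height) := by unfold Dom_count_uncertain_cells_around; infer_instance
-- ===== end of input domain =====

-- B replaces A's 11×11 offset scan with per-cell bounds checks by clamping the box to the
-- grid once and counting -1 in one contiguous slice per row (idiomatic, not claimed faster).

-- ===== PORT A =====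
def count_uncertain_cells_around (index : Int) (occupancy_data_np : List Int) (width : Int) (height : Int) : Int :=
  let row := PySem.Int.floordiv index width
  let col := PySem.Int.mod index width
  (PySem.List.pyRange (-5) 6 1).foldl (fun acc dr =>
    (PySem.List.pyRange (-5) 6 1).foldl (fun acc2 dc =>
      let r := row + dr
      let c := col + dc
      if 0 ≤ r ∧ r < height ∧ 0 ≤ c ∧ c < width then
        if PySem.List.pyGetD occupancy_data_np (r * width + c) 0 == -1 then acc2 + 1 else acc2
      else acc2) acc) 0

-- ===== PORT B =====
def count_uncertain_cells_around_alt (index : Int) (occupancy_data_np : List Int) (width : Int) (height : Int) : Int :=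
  let row := PySem.Int.floordiv index width
  let col := PySem.Int.mod index width
  let r0 := max 0 (row - 5)
  let r1 := min height (row + 6)
  let c0 := max 0 (col - 5)
  let c1 := min width (col + 6)
  if r0 ≥ r1 ∨ c0 ≥ c1 then 0
  else
    (PySem.List.pyRange r0 r1 1).foldl (fun acc r =>
      acc + ((PySem.List.slice occupancy_data_np (some (r * width + c0)) (some (r * width + c1))).count (-1) : Int)) 0

-- ===== PRECONDITION & SPEC =====
-- Pre_ excludes exactly the inputs where Python A raises: width = 0 (ZeroDivisionError on //),
-- and lists shorter than the last in-bounds index of the clamped box (IndexError).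
def Pre_count_uncertain_cells_around (index : Int) (occupancy_data_np : List Int) (width : Int) (height : Int) : Prop :=
  width ≠ 0 ∧
  (max 0 (PySem.Int.floordiv index width - 5) < min height (PySem.Int.floordiv index width + 6) →
   max 0 (PySem.Int.mod index width - 5) < min width (PySem.Int.mod index width + 6) →
   (min height (PySem.Int.floordiv index width + 6) - 1) * width + min width (PySem.Int.mod index width + 6) ≤ occupancy_data_np.length)
instance (index : Int) (occupancy_data_np : List Int) (width : Int) (height : Int) : Decidable (Pre_count_uncertain_cells_around index occupancy_data_np width height) := by unfold Pre_count_uncertain_cells_around; infer_instance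

def pvWitness_count_uncertain_cells_around : Int × List Int × Int × Int := (0, [-1, 0, 0, -1], 2, 2)

def Spec_count_uncertain_cells_around (index : Int) (occupancy_data_np : List Int) (width : Int) (height : Int) (out : Int) : Prop := out = count_uncertain_cells_around_alt index occupancy_data_np width height
instance (index : Int) (occupancy_data_np : List Int) (width : Int) (height : Int) (out : Int) : Decidable (Spec_count_uncertain_cells_around index occupancy_data_np width height out) := by unfold Spec_count_uncertain_cells_around; infer_instance

-- ===== CLAIM (what is proved, stated in full; the proofs are below) =====
def Claim_equal_count_uncertain_cells_around : Prop := ∀ (index : Int) (occupancy_data_np : List Int) (width : Int) (height : Int), Dom_count_uncertain_cells_around index occupancy_data_np width height → Pre_count_uncertain_cells_around index occupancy_data_np width height → Spec_count_uncertain_cells_around index occupancy_data_np width height (count_uncertain_cells_around index occupancy_data_np width height)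
-- ===== LEMMAS AND PROOFS =====

-- a foldl whose step adds a per-element amount is the sum of those amounts (pointwise form)
lemma pvFoldl_eq_sum (l : List Int) (F : Int → Int → Int) (g : Int → Int)
    (h : ∀ acc x, F acc x = acc + g x) (a : Int) : l.foldl F a = a + (l.map g).sum := by
  induction l generalizing a with
  | nil => simp
  | cons x xs ih => simp only [List.foldl_cons, List.map_cons, List.sum_cons, h, ih, add_assoc]

lemma pvCountP_shift (p : Int → Bool) (a b t : Int) :
    (PySem.List.pyRange a b 1).countP (fun x => p (t + x))
      = (PySem.List.pyRange (t + a) (t + b) 1).countP p := by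
  rw [PySem.List.pyRange_one, PySem.List.pyRange_one, List.countP_map, List.countP_map]
  have hb : (t + b - (t + a)) = b - a := by ring
  rw [hb]
  have hf : ((fun x => p (t + x)) ∘ fun k : Nat => a + (k : Int)) = (p ∘ fun k : Nat => t + a + (k : Int)) := by
    funext k
    simp only [Function.comp_apply]
    congr 1
    ring
  rw [hf]

lemma pvSum_shift (f : Int → Int) (a b t : Int) :
    ((PySem.List.pyRange a b 1).map (fun x => f (t + x))).sum
      = ((PySem.List.pyRange (t + a) (t + b) 1).map f).sum := by
  rw [PySem.List.pyRange_one, PySem.List.pyRange_one, List.map_map, List.map_map]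
  have hb : (t + b - (t + a)) = b - a := by ring
  rw [hb]
  have hf : ((fun x => f (t + x)) ∘ fun k : Nat => a + (k : Int)) = (f ∘ fun k : Nat => t + a + (k : Int)) := by
    funext k
    simp only [Function.comp_apply]
    congr 1
    ring
  rw [hf]

lemma pvSlice_eq_map (occ : List Int) (a b : Int) (ha : 0 ≤ a) (hab : a ≤ b) (hb : b ≤ occ.length) :
    PySem.List.slice occ (some a) (some b)
      = (PySem.List.pyRange a b 1).map (fun j => PySem.List.pyGetD occ j 0) := by
  rw [PySem.List.slice_toNat occ ha (le_trans ha hab), PySem.List.pyRange_one]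
  apply List.ext_getElem
  · simp only [List.length_take, List.length_drop, List.length_map, List.length_range]
    omega
  · intro k h1 h2
    simp only [List.length_take, List.length_drop, List.length_map, List.length_range] at h1 h2
    simp only [List.getElem_take, List.getElem_drop, List.getElem_map, List.getElem_range]
    rw [PySem.List.pyGetD_eq_getElem occ 0 (by omega) (by omega)]
    congr 1
    omega

-- ===== VERDICT (by name: the statement is the Claim_ definition above) =====
theorem count_uncertain_cells_around_spec : Claim_equal_count_uncertain_cells_around := by
  intro index occ width height _ hpre
  obtain ⟨hw0, hlen⟩ := hpre
  unfold Spec_count_uncertain_cells_around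
  simp only [count_uncertain_cells_around, count_uncertain_cells_around_alt]
  set row := PySem.Int.floordiv index width with hrow
  set col := PySem.Int.mod index width with hcol
  set r0 := max 0 (row - 5) with hr0
  set r1 := min height (row + 6) with hr1
  set c0 := max 0 (col - 5) with hc0
  set c1 := min width (col + 6) with hc1
  -- the per-(dr,dc) indicator of A's innermost branch
  set q : Int → Int → Bool := fun dr dc =>
    decide (0 ≤ row + dr ∧ row + dr < height ∧ 0 ≤ col + dc ∧ col + dc < width) &&
      (PySem.List.pyGetD occ ((row + dr) * width + (col + dc)) 0 == -1) with hq
  -- A's inner loop counts q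
  have hinner : ∀ (acc dr : Int),
      (PySem.List.pyRange (-5) 6 1).foldl (fun acc2 dc =>
        if 0 ≤ row + dr ∧ row + dr < height ∧ 0 ≤ col + dc ∧ col + dc < width then
          if PySem.List.pyGetD occ ((row + dr) * width + (col + dc)) 0 == -1 then acc2 + 1 else acc2
        else acc2) acc
      = acc + ((PySem.List.pyRange (-5) 6 1).countP (q dr) : Int) := by
    intro acc dr
    have hfun : (fun (acc2 : Int) dc =>
        if 0 ≤ row + dr ∧ row + dr < height ∧ 0 ≤ col + dc ∧ col + dc < width then
          if PySem.List.pyGetD occ ((row + dr) * width + (col + dc)) 0 == -1 then acc2 + 1 else acc2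
        else acc2)
        = (fun acc2 dc => if q dr dc then acc2 + 1 else acc2) := by
      funext acc2 dc
      by_cases h1 : 0 ≤ row + dr ∧ row + dr < height ∧ 0 ≤ col + dc ∧ col + dc < width <;>
        by_cases h2 : PySem.List.pyGetD occ ((row + dr) * width + (col + dc)) 0 == -1 <;>
          simp [hq, h1, h2]
    rw [hfun, PySem.List.foldl_if_add_one]
  have hA : (PySem.List.pyRange (-5) 6 1).foldl (fun acc dr =>
      (PySem.List.pyRange (-5) 6 1).foldl (fun acc2 dc =>
        if 0 ≤ row + dr ∧ row + dr < height ∧ 0 ≤ col + dc ∧ col + dc < width then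
          if PySem.List.pyGetD occ ((row + dr) * width + (col + dc)) 0 == -1 then acc2 + 1 else acc2
        else acc2) acc) 0
      = 0 + ((PySem.List.pyRange (-5) 6 1).map
          (fun dr => ((PySem.List.pyRange (-5) 6 1).countP (q dr) : Int))).sum :=
    pvFoldl_eq_sum _ _ _ (fun acc dr => hinner acc dr) 0
  rw [hA]
  by_cases hdeg : r0 ≥ r1 ∨ c0 ≥ c1
  · rw [if_pos hdeg]
    rw [zero_add]
    apply List.sum_eq_zero
    intro x hx
    rw [List.mem_map] at hx
    obtain ⟨dr, hdr, rfl⟩ := hx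
    rw [PySem.List.mem_pyRange_one] at hdr
    rw [Int.natCast_eq_zero, List.countP_eq_zero]
    intro dc hdc
    rw [PySem.List.mem_pyRange_one] at hdc
    simp only [hq, Bool.and_eq_true, decide_eq_true_eq, not_and]
    rintro ⟨h1, h2, h3, h4⟩
    exact absurd rfl (by omega : ¬ (0 : Int) = 0)
  · rw [if_neg hdeg]
    have hr01 : r0 < r1 := by omega
    have hc01 : c0 < c1 := by omega
    have hw : 0 < width := by omega
    have hlen' : (r1 - 1) * width + c1 ≤ (occ.length : Int) := hlen hr01 hc01
    -- bounds for each clamped row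
    have hrowbound : ∀ r : Int, r0 ≤ r → r < r1 →
        0 ≤ r * width + c0 ∧ r * width + c0 ≤ r * width + c1 ∧ r * width + c1 ≤ (occ.length : Int) := by
      intro r h1 h2
      have h0r : 0 ≤ r := by omega
      have hm1 : r * width ≤ (r1 - 1) * width :=
        mul_le_mul_of_nonneg_right (by omega) (by omega)
      have hm2 : 0 ≤ r * width := mul_nonneg h0r (by omega)
      exact ⟨by omega, by omega, by omega⟩
    -- per-row: A's column count equals B's slice count
    have hcnt : ∀ r : Int, r0 ≤ r → r < r1 →
        (((PySem.List.pyRange c0 c1 1).countP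
            (fun c => PySem.List.pyGetD occ (r * width + c) 0 == -1) : Int))
          = ((PySem.List.slice occ (some (r * width + c0)) (some (r * width + c1))).count (-1) : Int) := by
      intro r h1 h2
      obtain ⟨hb1, hb2, hb3⟩ := hrowbound r h1 h2
      rw [pvSlice_eq_map occ _ _ hb1 hb2 hb3]
      rw [List.count_eq_countP, List.countP_map]
      simp only [Function.comp_def]
      rw [← pvCountP_shift (fun j => PySem.List.pyGetD occ j 0 == -1) c0 c1 (r * width)]
    -- B's loop is the sum of slice counts
    have hB : (PySem.List.pyRange r0 r1 1).foldl (fun acc r =>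
        acc + ((PySem.List.slice occ (some (r * width + c0)) (some (r * width + c1))).count (-1) : Int)) 0
        = 0 + ((PySem.List.pyRange r0 r1 1).map
            (fun r => ((PySem.List.slice occ (some (r * width + c0)) (some (r * width + c1))).count (-1) : Int))).sum :=
      pvFoldl_eq_sum _ _ _ (fun acc r => rfl) 0
    rw [hB]
    -- evaluate each dr-term of A through the row indicator h
    have hgA : ∀ dr ∈ PySem.List.pyRange (-5) 6 1,
        (((PySem.List.pyRange (-5) 6 1).countP (q dr) : Int))
          = (fun r => if r0 ≤ r ∧ r < r1 then
              ((PySem.List.slice occ (some (r * width + c0)) (some (r * width + c1))).count (-1) : Int)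
            else 0) (row + dr) := by
      intro dr hdr
      rw [PySem.List.mem_pyRange_one] at hdr
      by_cases hin : r0 ≤ row + dr ∧ row + dr < r1
      · simp only [if_pos hin]
        have hshift : (PySem.List.pyRange (-5) 6 1).countP (q dr)
            = (PySem.List.pyRange (col + -5) (col + 6) 1).countP
                (fun c => decide (0 ≤ row + dr ∧ row + dr < height ∧ 0 ≤ c ∧ c < width) &&
                  (PySem.List.pyGetD occ ((row + dr) * width + c) 0 == -1)) := by
          rw [← pvCountP_shift (fun c =>
              decide (0 ≤ row + dr ∧ row + dr < height ∧ 0 ≤ c ∧ c < width) &&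
                (PySem.List.pyGetD occ ((row + dr) * width + c) 0 == -1)) (-5) 6 col]
        rw [hshift]
        have e1 : col + -5 = col - 5 := by ring
        rw [e1]
        rw [PySem.List.pyRange_one_append (col - 5) c0 (col + 6) (by omega) (by omega)]
        rw [PySem.List.pyRange_one_append c0 c1 (col + 6) (by omega) (by omega)]
        rw [List.countP_append, List.countP_append]
        have hz1 : (PySem.List.pyRange (col - 5) c0 1).countP
            (fun c => decide (0 ≤ row + dr ∧ row + dr < height ∧ 0 ≤ c ∧ c < width) &&
              (PySem.List.pyGetD occ ((row + dr) * width + c) 0 == -1)) = 0 := by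
          rw [List.countP_eq_zero]
          intro c hc
          rw [PySem.List.mem_pyRange_one] at hc
          simp only [Bool.and_eq_true, decide_eq_true_eq, not_and]
          rintro ⟨g1, g2, g3, g4⟩
          exact absurd rfl (by omega : ¬ (0 : Int) = 0)
        have hz2 : (PySem.List.pyRange c1 (col + 6) 1).countP
            (fun c => decide (0 ≤ row + dr ∧ row + dr < height ∧ 0 ≤ c ∧ c < width) &&
              (PySem.List.pyGetD occ ((row + dr) * width + c) 0 == -1)) = 0 := by
          rw [List.countP_eq_zero]
          intro c hc
          rw [PySem.List.mem_pyRange_one] at hc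
          simp only [Bool.and_eq_true, decide_eq_true_eq, not_and]
          rintro ⟨g1, g2, g3, g4⟩
          exact absurd rfl (by omega : ¬ (0 : Int) = 0)
        rw [hz1, hz2]
        have hmid : (PySem.List.pyRange c0 c1 1).countP
            (fun c => decide (0 ≤ row + dr ∧ row + dr < height ∧ 0 ≤ c ∧ c < width) &&
              (PySem.List.pyGetD occ ((row + dr) * width + c) 0 == -1))
            = (PySem.List.pyRange c0 c1 1).countP
                (fun c => PySem.List.pyGetD occ ((row + dr) * width + c) 0 == -1) := by
          apply List.countP_congr
          intro c hc
          rw [PySem.List.mem_pyRange_one] at hc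
          simp only [Bool.and_eq_true, decide_eq_true_eq]
          constructor
          · rintro ⟨_, h⟩; exact h
          · intro h; exact ⟨⟨by omega, by omega, by omega, by omega⟩, h⟩
        rw [hmid]
        simp only [Nat.add_zero, Nat.zero_add]
        exact hcnt (row + dr) hin.1 hin.2
      · simp only [if_neg hin]
        rw [Int.natCast_eq_zero, List.countP_eq_zero]
        intro dc hdc
        rw [PySem.List.mem_pyRange_one] at hdc
        simp only [hq, Bool.and_eq_true, decide_eq_true_eq, not_and]
        rintro ⟨h1, h2, h3, h4⟩
        exact absurd rfl (by omega : ¬ (0 : Int) = 0)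
    rw [List.map_congr_left hgA]
    rw [pvSum_shift (fun r => if r0 ≤ r ∧ r < r1 then
        ((PySem.List.slice occ (some (r * width + c0)) (some (r * width + c1))).count (-1) : Int)
      else 0) (-5) 6 row]
    have e2 : row + -5 = row - 5 := by ring
    rw [e2]
    rw [PySem.List.pyRange_one_append (row - 5) r0 (row + 6) (by omega) (by omega)]
    rw [PySem.List.pyRange_one_append r0 r1 (row + 6) (by omega) (by omega)]
    rw [List.map_append, List.map_append, List.sum_append, List.sum_append]
    have hs1 : ((PySem.List.pyRange (row - 5) r0 1).map (fun r =>
        if r0 ≤ r ∧ r < r1 then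
          ((PySem.List.slice occ (some (r * width + c0)) (some (r * width + c1))).count (-1) : Int)
        else 0)).sum = 0 := by
      apply List.sum_eq_zero
      intro x hx
      rw [List.mem_map] at hx
      obtain ⟨r, hr, rfl⟩ := hx
      rw [PySem.List.mem_pyRange_one] at hr
      rw [if_neg (by omega)]
    have hs3 : ((PySem.List.pyRange r1 (row + 6) 1).map (fun r =>
        if r0 ≤ r ∧ r < r1 then
          ((PySem.List.slice occ (some (r * width + c0)) (some (r * width + c1))).count (-1) : Int)
        else 0)).sum = 0 := by
      apply List.sum_eq_zero
      intro x hx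
      rw [List.mem_map] at hx
      obtain ⟨r, hr, rfl⟩ := hx
      rw [PySem.List.mem_pyRange_one] at hr
      rw [if_neg (by omega)]
    rw [hs1, hs3]
    have hs2 : ((PySem.List.pyRange r0 r1 1).map (fun r =>
        if r0 ≤ r ∧ r < r1 then
          ((PySem.List.slice occ (some (r * width + c0)) (some (r * width + c1))).count (-1) : Int)
        else 0))
        = (PySem.List.pyRange r0 r1 1).map (fun r =>
            ((PySem.List.slice occ (some (r * width + c0)) (some (r * width + c1))).count (-1) : Int)) := by
      apply List.map_congr_left
      intro r hr
      rw [PySem.List.mem_pyRange_one] at hr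
      rw [if_pos (by omega)]
    rw [hs2]
    ring
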